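-- pv_equiv track=rewrite | github.com/Heez27/AI_Edu | Day4/실습2/실습2.py | revsqueeze
-- ===== SOURCE A (Python) =====
-- def revsqueeze(s,t):
--     result = ''
--     for i in s:   # t 제거
--         if (i != t[0]):
--             result = result + i
--
--     temp = ''
--     for i in result:  #reverse
--         temp = i + temp
--
--     result = temp
--     return result
-- ===== SOURCE B (Python) =====
-- def revsqueeze(s, t):
--     # Reverse first, then filter forward with a comprehension and join.
--     return ''.join(c for c in reversed(s) if c != t[0])
-- ===== Notes on version B (the rewrite author's own statement) =====
-- stated objective: idiomatic
-- what changed: A filters with character-by-character string concatenation and then reverses with a second prepending loop; B reverses first and filters in a single comprehension joined once.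
import Mathlib
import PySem

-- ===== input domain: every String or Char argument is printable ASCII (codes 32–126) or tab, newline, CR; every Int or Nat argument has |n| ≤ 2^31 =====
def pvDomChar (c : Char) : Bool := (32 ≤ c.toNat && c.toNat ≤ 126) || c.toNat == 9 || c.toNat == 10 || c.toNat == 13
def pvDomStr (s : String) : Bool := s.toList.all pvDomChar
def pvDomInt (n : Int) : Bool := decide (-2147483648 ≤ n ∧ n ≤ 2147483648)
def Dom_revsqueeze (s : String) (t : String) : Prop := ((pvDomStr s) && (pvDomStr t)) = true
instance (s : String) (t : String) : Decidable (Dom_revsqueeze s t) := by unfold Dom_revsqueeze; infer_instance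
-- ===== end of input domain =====

-- B reverses s first and filters forward in one pass, instead of A's filter-by-append loop followed by a reversing loop.


-- ===== PORT A =====
-- A: result = '' ; for i in s: if i != t[0]: result = result + i ; then temp = '' ; for i in result: temp = i + temp.
-- t[0] is PySem.Str.pyGet? t 0 (none = IndexError, excluded by Pre_ when s is nonempty).
def revsqueeze (s : String) (t : String) : String :=
  let result : List Char :=
    s.toList.foldl (fun acc i => if some i ≠ PySem.Str.pyGet? t 0 then acc ++ [i] else acc) []
  let temp : List Char := result.foldl (fun acc i => i :: acc) []
  String.mk temp

-- ===== PORT B =====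
-- B: ''.join(c for c in reversed(s) if c != t[0])
def revsqueeze_alt (s : String) (t : String) : String :=
  String.mk (s.toList.reverse.filter (fun c => decide (some c ≠ PySem.Str.pyGet? t 0)))

-- ===== PRECONDITION & SPEC =====
-- Pre_ excludes exactly the inputs where Python's t[0] raises IndexError: t empty while s nonempty.
def Pre_revsqueeze (s : String) (t : String) : Prop := s = "" ∨ t ≠ ""
instance (s : String) (t : String) : Decidable (Pre_revsqueeze s t) := by unfold Pre_revsqueeze; infer_instance
def pvWitness_revsqueeze : String × String := ("abcab", "b")

def Spec_revsqueeze (s : String) (t : String) (out : String) : Prop := out = revsqueeze_alt s t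
instance (s : String) (t : String) (out : String) : Decidable (Spec_revsqueeze s t out) := by unfold Spec_revsqueeze; infer_instance

-- ===== CLAIM (what is proved, stated in full; the proofs are below) =====
def Claim_equal_revsqueeze : Prop := ∀ (s : String) (t : String), Dom_revsqueeze s t → Pre_revsqueeze s t → Spec_revsqueeze s t (revsqueeze s t)

-- ===== LEMMAS AND PROOFS =====

-- A's first loop is a filter.
theorem revsqueeze_foldl_filter (p : Char → Prop) [DecidablePred p] (l acc : List Char) :
    l.foldl (fun a i => if p i then a ++ [i] else a) acc = acc ++ l.filter (fun i => decide (p i)) := by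
  induction l generalizing acc with
  | nil => simp
  | cons x xs ih =>
    simp only [List.foldl_cons, List.filter_cons]
    by_cases h : p x <;> simp [h, ih]

-- A's second loop reverses.
theorem revsqueeze_foldl_reverse (l acc : List Char) :
    l.foldl (fun a i => i :: a) acc = l.reverse ++ acc := by
  induction l generalizing acc with
  | nil => simp
  | cons x xs ih => simp [ih]

-- ===== VERDICT (by name: the statement is the Claim_ definition above) =====
theorem revsqueeze_spec : Claim_equal_revsqueeze := by
  intro s t _ _
  unfold Spec_revsqueeze revsqueeze revsqueeze_alt
  simp only [revsqueeze_foldl_filter, revsqueeze_foldl_reverse, List.filter_reverse,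
    List.nil_append, List.append_nil]
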